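-- pv_equiv track=rewrite | github.com/Khodaparastan/ExecTunnel | exectunnel/observability/metrics.py | _render_metric_key
-- ===== SOURCE A (Python) =====
-- from typing import Final, NamedTuple, TypeAlias
--
-- _NormalizedTags: TypeAlias = tuple[tuple[str, str], ...]
--
-- def _escape_tag_component(value: str) -> str:
--     return (
--         value
--         .replace("\\", "\\\\")
--         .replace("{", "\\{")
--         .replace("}", "\\}")
--         .replace(",", "\\,")
--         .replace("=", "\\=")
--     )
--
-- def _render_metric_key(name: str, tags: _NormalizedTags) -> str:
--     if not tags:
--         return name
--     joined = ",".join(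
--         f"{_escape_tag_component(key)}={_escape_tag_component(value)}"
--         for key, value in tags
--     )
--     return f"{name}{{{joined}}}"
-- ===== SOURCE B (Python) =====
-- # B: one streaming pass with an explicit accumulator of output pieces —
-- # escaping is "prepend a backslash before any special char" emitted char by
-- # char, and the separator/braces are emitted inline instead of join over a
-- # comprehension of fully-escaped strings.
--
-- def _emit_escaped(out, s):
--     for ch in s:
--         if ch in "\\{},=":
--             out.append("\\")
--         out.append(ch)
--
-- def _render_metric_key(name, tags):
--     if not tags:
--         return name
--     out = [name, "{"]
--     first = True
--     for key, value in tags: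
--         if not first:
--             out.append(",")
--         first = False
--         _emit_escaped(out, key)
--         out.append("=")
--         _emit_escaped(out, value)
--     out.append("}")
--     return "".join(out)
-- ===== Notes on version B (the rewrite author's own statement) =====
-- stated objective: alternative
-- what changed: Replaced the comprehension-plus-join over five chained full-string replaces by a single streaming pass that walks the tag list with a first-item flag and emits every piece (separators, braces, and per-character escapes with a prepended backslash) into one accumulator joined once at the end.
import Mathlib
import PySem

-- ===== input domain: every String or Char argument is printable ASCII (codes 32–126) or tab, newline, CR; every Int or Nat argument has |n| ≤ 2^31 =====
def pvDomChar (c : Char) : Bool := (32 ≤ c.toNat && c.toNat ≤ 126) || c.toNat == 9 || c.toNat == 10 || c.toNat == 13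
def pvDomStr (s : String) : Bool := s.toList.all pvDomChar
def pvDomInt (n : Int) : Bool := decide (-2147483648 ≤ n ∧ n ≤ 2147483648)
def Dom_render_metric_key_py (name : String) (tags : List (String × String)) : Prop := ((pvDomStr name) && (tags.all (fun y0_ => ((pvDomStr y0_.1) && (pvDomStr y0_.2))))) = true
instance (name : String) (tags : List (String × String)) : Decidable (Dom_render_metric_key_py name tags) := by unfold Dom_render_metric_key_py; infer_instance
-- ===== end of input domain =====

-- B is a single streaming pass over the tag list with a first-item flag and a piece
-- accumulator (escape = prepend backslash per special char), instead of A's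
-- comprehension + ",".join over five chained full-string replaces; same output.

-- ===== PORT A =====
def escape_tag_component_py (value : String) : String :=
  PySem.Str.replace
    (PySem.Str.replace
      (PySem.Str.replace
        (PySem.Str.replace
          (PySem.Str.replace value "\\" "\\\\")
          "{" "\\{")
        "}" "\\}")
      "," "\\,")
    "=" "\\="

def render_metric_key_py (name : String) (tags : List (String × String)) : String :=
  if tags.isEmpty then name
  else
    let joined := PySem.Str.join ","
      (tags.map (fun kv => escape_tag_component_py kv.1 ++ "=" ++ escape_tag_component_py kv.2))
    name ++ "{" ++ joined ++ "}"

-- ===== PORT B =====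
-- 'ch in "\\{},="' for the single character ch: membership of ch in the string's chars (exact)
def emit_escaped_py (out : List String) (s : String) : List String :=
  s.toList.foldl (fun acc ch =>
    let acc := if ("\\{},=" : String).toList.contains ch then acc ++ ["\\"] else acc
    acc ++ [ch.toString]) out

def render_metric_key_py_alt (name : String) (tags : List (String × String)) : String :=
  if tags.isEmpty then name
  else
    let step := fun (p : List String × Bool) (kv : String × String) =>
      let out := if p.2 then p.1 else p.1 ++ [","]
      let out := emit_escaped_py out kv.1
      let out := out ++ ["="]
      let out := emit_escaped_py out kv.2
      (out, false)
    let res := tags.foldl step ([name, "{"], true)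
    PySem.Str.join "" (res.1 ++ ["}"])

-- ===== PRECONDITION & SPEC =====
def Spec_render_metric_key_py (name : String) (tags : List (String × String)) (out : String) : Prop := out = render_metric_key_py_alt name tags
instance (name : String) (tags : List (String × String)) (out : String) : Decidable (Spec_render_metric_key_py name tags out) := by unfold Spec_render_metric_key_py; infer_instance

-- ===== CLAIM (what is proved, stated in full; the proofs are below) =====
def Claim_equal_render_metric_key_py : Prop := ∀ (name : String) (tags : List (String × String)), Dom_render_metric_key_py name tags → Spec_render_metric_key_py name tags (render_metric_key_py name tags)

-- ===== LEMMAS AND PROOFS =====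

-- per-character escape, chars level
def escChar (c : Char) : List Char :=
  if ("\\{},=" : String).toList.contains c then ['\\', c] else [c]

-- per-character escape, pieces level (what B emits)
def escPieces (s : String) : List String :=
  s.toList.flatMap (fun c =>
    if ("\\{},=" : String).toList.contains c then ["\\", c.toString] else [c.toString])

def itemPieces (kv : String × String) : List String :=
  escPieces kv.1 ++ ["="] ++ escPieces kv.2

-- replace with a single-character pattern is a per-character flatMap
lemma replace_go_single (p : Char) (new : List Char) :
    ∀ (l : List Char) (fuel : Nat) (acc : List Char), l.length ≤ fuel →
      PySem.Chars.replace.go [p] new fuel l acc =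
        acc.reverse ++ l.flatMap (fun c => if c = p then new else [c]) := by
  intro l
  induction l with
  | nil =>
    intro fuel acc _
    cases fuel <;> simp [PySem.Chars.replace.go]
  | cons c t ih =>
    intro fuel acc hf
    cases fuel with
    | zero => simp at hf
    | succ f =>
      simp only [PySem.Chars.replace.go]
      by_cases hc : c = p
      · subst hc
        simp only [List.isPrefixOf] at *
        rw [if_pos (by simp)]
        simp only [List.length_cons, List.length_nil, List.drop_succ_cons, List.drop_zero]
        rw [ih f (new.reverse ++ acc) (by simpa using Nat.lt_succ_iff.mp (by simpa using hf))]
        simp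
      · rw [if_neg (by simp [List.isPrefixOf]; intro h; exact absurd h.symm (by simpa using hc))]
        rw [ih f (c :: acc) (by simpa using Nat.lt_succ_iff.mp (by simpa using hf))]
        simp [hc]

lemma replace_single (p : Char) (new s : List Char) :
    PySem.Chars.replace s [p] new = s.flatMap (fun c => if c = p then new else [c]) := by
  rw [PySem.Chars.replace]
  simp only [List.isEmpty_cons]
  rw [replace_go_single p new s s.length [] le_rfl]
  simp

-- the five chained per-character maps compose to escChar
lemma chain_eq_escChar (c : Char) :
    ((if c = '\\' then ['\\','\\'] else [c]).flatMap (fun x =>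
      (if x = '{' then ['\\','{'] else [x]).flatMap (fun x =>
        (if x = '}' then ['\\','}'] else [x]).flatMap (fun x =>
          (if x = ',' then ['\\',','] else [x]).flatMap (fun x =>
            if x = '=' then ['\\','='] else [x]))))) = escChar c := by
  by_cases h1 : c = '\\'
  · subst h1; decide
  by_cases h2 : c = '{'
  · subst h2; decide
  by_cases h3 : c = '}'
  · subst h3; decide
  by_cases h4 : c = ','
  · subst h4; decide
  by_cases h5 : c = '='
  · subst h5; decide
  simp [h1, h2, h3, h4, h5, escChar]

-- A's escape, at the chars level
lemma escA_toList (v : String) :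
    (escape_tag_component_py v).toList = v.toList.flatMap escChar := by
  unfold escape_tag_component_py
  simp only [PySem.Str.toList_replace]
  rw [(by decide : ("\\" : String).toList = ['\\']), (by decide : ("{" : String).toList = ['{']),
      (by decide : ("}" : String).toList = ['}']), (by decide : ("," : String).toList = [',']),
      (by decide : ("=" : String).toList = ['='])]
  rw [replace_single, replace_single, replace_single, replace_single, replace_single]
  rw [(by decide : ("\\\\" : String).toList = ['\\','\\']), (by decide : ("\\{" : String).toList = ['\\','{']),
      (by decide : ("\\}" : String).toList = ['\\','}']), (by decide : ("\\," : String).toList = ['\\',',']),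
      (by decide : ("\\=" : String).toList = ['\\','='])]
  simp only [List.flatMap_assoc]
  exact List.flatMap_congr (fun c _ => chain_eq_escChar c)

-- B's per-string emitter appends escPieces
lemma emit_escaped_eq (s : String) : ∀ out, emit_escaped_py out s = out ++ escPieces s := by
  unfold emit_escaped_py escPieces
  generalize s.toList = l
  induction l with
  | nil => intro out; simp
  | cons c t ih =>
    intro out
    simp only [List.foldl_cons, List.flatMap_cons]
    rw [ih]
    split_ifs <;> simp

-- B's loop after the first item
lemma foldl_step_false :
    ∀ (l : List (String × String)) (out : List String),
      l.foldl (fun (p : List String × Bool) (kv : String × String) =>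
          let out := if p.2 then p.1 else p.1 ++ [","]
          let out := emit_escaped_py out kv.1
          let out := out ++ ["="]
          let out := emit_escaped_py out kv.2
          (out, false)) (out, false) =
        (out ++ l.flatMap (fun kv => [","] ++ itemPieces kv), false) := by
  intro l
  induction l with
  | nil => intro out; simp
  | cons kv t ih =>
    intro out
    simp only [List.foldl_cons]
    rw [ih]
    simp [emit_escaped_eq, itemPieces, List.append_assoc]

-- join with the empty separator is concatenation, chars level
lemma join_nil_eq_flatten : ∀ (l : List (List Char)), PySem.Chars.join [] l = l.flatten := by
  intro l
  induction l with
  | nil => simp [PySem.Chars.join_nil]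
  | cons a t ih =>
    cases t with
    | nil => simp [PySem.Chars.join_singleton]
    | cons b u => rw [PySem.Chars.join_cons_cons, ih]; simp

-- join with "," as head ++ flatMap of comma-prefixed tails
lemma join_comma_eq (x : List Char) : ∀ (xs : List (List Char)),
    PySem.Chars.join [','] (x :: xs) = x ++ xs.flatMap (fun y => ',' :: y) := by
  intro xs
  induction xs generalizing x with
  | nil => simp [PySem.Chars.join_singleton]
  | cons b u ih => rw [PySem.Chars.join_cons_cons, ih b]; simp

-- pieces flatten to the chars-level escape
lemma escPieces_flatten (s : String) :
    ((escPieces s).map String.toList).flatten = s.toList.flatMap escChar := by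
  unfold escPieces
  generalize s.toList = l
  induction l with
  | nil => simp
  | cons c t ih =>
    simp only [List.flatMap_cons, List.map_append, List.flatten_append, ih, escChar]
    split_ifs <;> simp

lemma itemPieces_flatten (kv : String × String) :
    ((itemPieces kv).map String.toList).flatten =
      kv.1.toList.flatMap escChar ++ '=' :: kv.2.toList.flatMap escChar := by
  unfold itemPieces
  simp [escPieces_flatten, (by decide : ("=" : String).toList = ['='])]

lemma comma_items_flatten : ∀ (rest : List (String × String)),
    (List.map String.toList (rest.flatMap (fun kv => "," :: itemPieces kv))).flatten =
      rest.flatMap (fun a => ',' :: (a.1.toList.flatMap escChar ++ '=' :: a.2.toList.flatMap escChar)) := by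
  intro rest
  induction rest with
  | nil => simp
  | cons kv r ih =>
    simp only [List.flatMap_cons, List.map_cons, List.map_append, List.flatten_cons,
      List.flatten_append, ih, itemPieces_flatten kv,
      (by decide : ("," : String).toList = [','])]
    simp

-- ===== VERDICT (by name: the statement is the Claim_ definition above) =====
theorem render_metric_key_py_spec : Claim_equal_render_metric_key_py := by
  intro name tags _
  unfold Spec_render_metric_key_py render_metric_key_py render_metric_key_py_alt
  cases tags with
  | nil => simp
  | cons t rest =>
    simp only [List.isEmpty_cons, if_neg (by simp : ¬ (false = true))]
    simp only [List.foldl_cons]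
    rw [if_pos trivial, foldl_step_false]
    apply String.ext
    simp only [String.toList_append, PySem.Str.toList_join,
      (by decide : ("" : String).toList = ([] : List Char)),
      (by decide : ("," : String).toList = [','])]
    rw [join_nil_eq_flatten]
    simp only [List.map_cons, List.map_append, List.map_map]
    rw [join_comma_eq]
    simp only [List.flatten_append, List.flatten_cons]
    simp [Function.comp, escA_toList, escPieces_flatten,
      comma_items_flatten, List.flatMap_map, emit_escaped_eq,
      (by decide : ("{" : String).toList = ['{']), (by decide : ("}" : String).toList = ['}']),
      (by decide : ("=" : String).toList = ['='])]
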